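-- pv_equiv track=rewrite | github.com/L-cloud/coding_test | programmers/389479.py | solution
-- ===== SOURCE A (Python) =====
-- from typing import List
-- from collections import deque
--
-- def solution(players: List[int], m: int, k: int) -> int:
--     '''
--     m = 서버 1대가 감당 가능한 인원, default 0대로 m-1명까지 가능
--     k = 서버 1대 최소 빌리는 시간
--     players = 0~23 길이. 각 인덱스는 게임 플레이어의 수
--
--     최소 증설 서버의 갯수는?
--     '''
--
--     '''
--     필요한 것 == 실시간 감당 가능한 수 +
--     흠.. 배열 길이 k 인 것 circular que로 해서.. 할까?
--     최대는 k * 24 충분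
--     '''
--     que, answer = deque([],k-1), 0
--     for i,player in enumerate(players):
--         s = sum(que) + 1
--         if player < s * m:
--             que.append(0)
--         else:
--             r = (player - s*m) // m + 1
--             answer += r
--             que.append(r)
--
--     return answer
-- ===== SOURCE B (Python) =====
-- from typing import List
--
-- def solution(players: List[int], m: int, k: int) -> int:
--     # O(n): keep a running sum of the last k-1 rented amounts, evicting the
--     # expired element instead of re-summing the window each step.
--     w = k - 1
--     added = []
--     total = 0
--     answer = 0
--     for player in players:
--         s = total + 1
--         if player < s * m:
--             r = 0
--         else:
--             r = (player - s * m) // m + 1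
--             answer += r
--         added.append(r)
--         total += r
--         if len(added) > w:
--             total -= added[len(added) - 1 - w]
--     return answer
-- ===== Notes on version B (the rewrite author's own statement) =====
-- stated objective: faster
-- what changed: B replaces A's per-step re-summation of the k-1 deque (sum(que) each iteration) with a single running window sum updated incrementally by adding the new rental and subtracting the element that falls out of the window.
import Mathlib
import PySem

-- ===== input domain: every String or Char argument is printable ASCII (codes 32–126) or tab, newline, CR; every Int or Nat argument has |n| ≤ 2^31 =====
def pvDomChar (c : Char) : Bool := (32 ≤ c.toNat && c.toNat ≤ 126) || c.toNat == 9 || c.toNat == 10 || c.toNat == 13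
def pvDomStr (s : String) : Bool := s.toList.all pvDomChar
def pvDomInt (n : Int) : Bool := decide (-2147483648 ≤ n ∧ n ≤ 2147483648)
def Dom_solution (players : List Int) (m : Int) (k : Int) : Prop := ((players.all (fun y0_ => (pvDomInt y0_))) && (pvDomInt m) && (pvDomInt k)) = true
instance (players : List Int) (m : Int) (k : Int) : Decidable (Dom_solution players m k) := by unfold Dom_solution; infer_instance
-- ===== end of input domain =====

-- B is an O(n) sliding-window-sum re-implementation of A's O(n*k) deque re-summation; return values proved equal on Pre_.

-- ===== PORT A =====
-- deque.append with maxlen: drop from the front once the length exceeds maxlen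
def pvDqApp (q : List Int) (x : Int) (maxlen : Nat) : List Int :=
  let q' := q ++ [x]
  if maxlen < q'.length then q'.drop (q'.length - maxlen) else q'

def pvStepA (m : Int) (maxlen : Nat) (st : List Int × Int) (player : Int) : List Int × Int :=
  let s := st.1.sum + 1
  if player < s * m then
    (pvDqApp st.1 0 maxlen, st.2)
  else
    let r := PySem.Int.floordiv (player - s * m) m + 1
    (pvDqApp st.1 r maxlen, st.2 + r)

def solution (players : List Int) (m : Int) (k : Int) : Int :=
  (players.foldl (pvStepA m (k - 1).toNat) ([], 0)).2

-- ===== PORT B =====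
-- state: (added, total, answer)
def pvStepB (m : Int) (w : Int) (st : List Int × Int × Int) (player : Int) : List Int × Int × Int :=
  let s := st.2.1 + 1
  let ra : Int × Int :=
    if player < s * m then (0, st.2.2)
    else
      let r := PySem.Int.floordiv (player - s * m) m + 1
      (r, st.2.2 + r)
  let added := st.1 ++ [ra.1]
  let total := st.2.1 + ra.1
  let total := if w < (added.length : Int) then
      total - (PySem.List.pyGet? added ((added.length : Int) - 1 - w)).getD 0
    else total
  (added, total, ra.2)

def solution_alt (players : List Int) (m : Int) (k : Int) : Int :=
  (players.foldl (pvStepB m (k - 1)) ([], 0, 0)).2.2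

-- ===== PRECONDITION & SPEC =====
-- Pre_ is exactly where Python A returns: deque([], k-1) raises ValueError for k < 1, and
-- with m = 0 the '// m' branch (reached iff some player ≥ 0) raises ZeroDivisionError.
def Pre_solution (players : List Int) (m : Int) (k : Int) : Prop :=
  1 ≤ k ∧ (m ≠ 0 ∨ ∀ p ∈ players, p < 0)
instance (players : List Int) (m : Int) (k : Int) : Decidable (Pre_solution players m k) := by unfold Pre_solution; infer_instance
def pvWitness_solution : List Int × Int × Int := ([3, 10, 0, 7], 2, 3)

def Spec_solution (players : List Int) (m : Int) (k : Int) (out : Int) : Prop := out = solution_alt players m k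
instance (players : List Int) (m : Int) (k : Int) (out : Int) : Decidable (Spec_solution players m k out) := by unfold Spec_solution; infer_instance

-- ===== CLAIM (what is proved, stated in full; the proofs are below) =====
def Claim_equal_solution : Prop := ∀ (players : List Int) (m : Int) (k : Int), Dom_solution players m k → Pre_solution players m k → Spec_solution players m k (solution players m k)

-- ===== LEMMAS AND PROOFS =====

def pvLastN (n : Nat) (l : List Int) : List Int := l.drop (l.length - n)

lemma pvLastN_len (w : Nat) (l : List Int) : (pvLastN w l).length = l.length - (l.length - w) := by
  simp [pvLastN]

lemma pvLastN_app (w : Nat) (l : List Int) (r : Int) :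
    (if w < (pvLastN w l ++ [r]).length then
       (pvLastN w l ++ [r]).drop ((pvLastN w l ++ [r]).length - w)
     else pvLastN w l ++ [r]) = pvLastN w (l ++ [r]) := by
  have hlen : (pvLastN w l ++ [r]).length = (l.length - (l.length - w)) + 1 := by
    simp [pvLastN_len]
  have hlen2 : (l ++ [r]).length = l.length + 1 := by simp
  by_cases h : l.length < w
  · rw [if_neg (by omega)]
    unfold pvLastN
    have h1 : l.length - w = 0 := by omega
    have h2 : l.length + 1 - w = 0 := by omega
    simp [h1, h2]
  · rw [if_pos (by omega)]
    rw [hlen]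
    have h3 : (l.length - (l.length - w)) + 1 - w = 1 := by omega
    rw [h3]
    unfold pvLastN
    by_cases hw : w = 0
    · subst hw
      simp
    · have h4 : 1 ≤ (l.drop (l.length - w)).length := by
        simp only [List.length_drop]; omega
      rw [List.drop_append_of_le_length h4, List.drop_drop,
          List.drop_append_of_le_length (by omega : (l ++ [r]).length - w ≤ l.length)]
      have h5 : (l ++ [r]).length - w = l.length - w + 1 := by omega
      rw [h5]

lemma pvSum_app (w : Nat) (l : List Int) (r : Int) :
    (if (w : Int) < ((l ++ [r]).length : Int) then
       (pvLastN w l).sum + r - (PySem.List.pyGet? (l ++ [r]) (((l ++ [r]).length : Int) - 1 - (w : Int))).getD 0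
     else (pvLastN w l).sum + r) = (pvLastN w (l ++ [r])).sum := by
  have hlen2 : (l ++ [r]).length = l.length + 1 := by simp
  by_cases h : l.length < w
  · rw [if_neg (by push_cast [hlen2]; omega)]
    unfold pvLastN
    have h1 : l.length - w = 0 := by omega
    have h2 : l.length + 1 - w = 0 := by omega
    simp [h1, h2]
  · rw [if_pos (by push_cast [hlen2]; omega)]
    have hidx : ((l ++ [r]).length : Int) - 1 - (w : Int) = ((l.length - w : Nat) : Int) := by
      push_cast [hlen2]; omega
    rw [hidx, PySem.List.pyGet?_natCast]
    by_cases hw : w = 0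
    · subst hw
      have hg : (l ++ [r])[l.length - 0]? = some r := by simp
      rw [hg]
      unfold pvLastN
      simp
    · have hlt : l.length - w < l.length := by omega
      have hg : (l ++ [r])[l.length - w]? = some l[l.length - w] := by
        rw [List.getElem?_append_left hlt, List.getElem?_eq_getElem hlt]
      rw [hg]
      unfold pvLastN
      rw [List.drop_append_of_le_length (by omega : (l ++ [r]).length - w ≤ l.length)]
      have h5 : (l ++ [r]).length - w = (l.length - w) + 1 := by omega
      rw [h5]
      rw [List.drop_eq_getElem_cons hlt]
      simp only [List.sum_cons, List.sum_append, List.sum_nil, Option.getD_some]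
      ring

def pvInv (w : Nat) (a : List Int × Int) (b : List Int × Int × Int) : Prop :=
  a.1 = pvLastN w b.1 ∧ b.2.1 = (pvLastN w b.1).sum ∧ a.2 = b.2.2

lemma pvStep_inv (m : Int) (w : Nat) (a : List Int × Int) (b : List Int × Int × Int)
    (h : pvInv w a b) (p : Int) : pvInv w (pvStepA m w a p) (pvStepB m (w : Int) b p) := by
  obtain ⟨h1, h2, h3⟩ := h
  by_cases hp : p < ((pvLastN w b.1).sum + 1) * m
  · have hA : pvStepA m w a p = (pvDqApp (pvLastN w b.1) 0 w, b.2.2) := by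
      simp only [pvStepA, h1, h3, if_pos hp]
    have hB : pvStepB m (w : Int) b p =
        (b.1 ++ [0],
         (if (w : Int) < ((b.1 ++ [(0:Int)]).length : Int) then
            (pvLastN w b.1).sum + 0 - (PySem.List.pyGet? (b.1 ++ [0]) (((b.1 ++ [(0:Int)]).length : Int) - 1 - (w : Int))).getD 0
          else (pvLastN w b.1).sum + 0),
         b.2.2) := by
      simp only [pvStepB, h2, if_pos hp]
    rw [hA, hB]
    refine ⟨?_, ?_, rfl⟩
    · simpa [pvDqApp] using pvLastN_app w b.1 0
    · simpa using (pvSum_app w b.1 0)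
  · have hA : pvStepA m w a p =
        (pvDqApp (pvLastN w b.1) (PySem.Int.floordiv (p - ((pvLastN w b.1).sum + 1) * m) m + 1) w,
         b.2.2 + (PySem.Int.floordiv (p - ((pvLastN w b.1).sum + 1) * m) m + 1)) := by
      simp only [pvStepA, h1, h3, if_neg hp]
    have hB : pvStepB m (w : Int) b p =
        (b.1 ++ [PySem.Int.floordiv (p - ((pvLastN w b.1).sum + 1) * m) m + 1],
         (if (w : Int) < ((b.1 ++ [PySem.Int.floordiv (p - ((pvLastN w b.1).sum + 1) * m) m + 1]).length : Int) then
            (pvLastN w b.1).sum + (PySem.Int.floordiv (p - ((pvLastN w b.1).sum + 1) * m) m + 1) - (PySem.List.pyGet? (b.1 ++ [PySem.Int.floordiv (p - ((pvLastN w b.1).sum + 1) * m) m + 1]) (((b.1 ++ [PySem.Int.floordiv (p - ((pvLastN w b.1).sum + 1) * m) m + 1]).length : Int) - 1 - (w : Int))).getD 0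
          else (pvLastN w b.1).sum + (PySem.Int.floordiv (p - ((pvLastN w b.1).sum + 1) * m) m + 1)),
         b.2.2 + (PySem.Int.floordiv (p - ((pvLastN w b.1).sum + 1) * m) m + 1)) := by
      simp only [pvStepB, h2, if_neg hp]
    rw [hA, hB]
    refine ⟨?_, ?_, rfl⟩
    · simpa [pvDqApp] using pvLastN_app w b.1 (PySem.Int.floordiv (p - ((pvLastN w b.1).sum + 1) * m) m + 1)
    · simpa using (pvSum_app w b.1 (PySem.Int.floordiv (p - ((pvLastN w b.1).sum + 1) * m) m + 1))

lemma pvFold_inv (m : Int) (w : Nat) (ps : List Int) (a : List Int × Int) (b : List Int × Int × Int)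
    (h : pvInv w a b) : pvInv w (ps.foldl (pvStepA m w) a) (ps.foldl (pvStepB m (w : Int)) b) := by
  induction ps generalizing a b with
  | nil => exact h
  | cons p ps ih => exact ih _ _ (pvStep_inv m w a b h p)

-- ===== VERDICT (by name: the statement is the Claim_ definition above) =====
theorem solution_spec : Claim_equal_solution := by
  intro players m k _ hpre
  have hk : (1:Int) ≤ k := hpre.1
  have hw : ((k - 1).toNat : Int) = k - 1 := by omega
  have h := pvFold_inv m (k - 1).toNat players ([], 0) ([], 0, 0)
    (by refine ⟨?_, ?_, rfl⟩ <;> simp [pvLastN])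
  unfold Spec_solution solution solution_alt
  rw [← hw]
  exact h.2.2
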